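-- pv_equiv track=rewrite | github.com/Baxianxiahai/med | tup/PkgL3cebsMk2Handler/ModCebsCtrlSchd.py | func_pswd_check
-- ===== SOURCE A (Python) =====
-- def func_pswd_check(input):
--     res = 0;
--     for i in range(0, 16):
--         mask = 1<<(2*i+1)
--         tmp = input & mask;
--         tmp = tmp>>(i+1)
--         res += tmp;
--     if (res == 0xAB56):
--         return True;
--     else:
--         return False;
-- ===== SOURCE B (Python) =====
-- # Bit i of 0xAB56 must appear at bit position 2*i+1 of the input; all 16 odd
-- # positions are checked at once with a single mask-and-compare.
-- ODD_MASK = 0xAAAAAAAA  # bits 1, 3, ..., 31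
-- EXPECTED = 0x888A2228  # bits of 0xAB56 spread to the odd positions
--
--
-- def func_pswd_check(input):
--     return (input & ODD_MASK) == EXPECTED
-- ===== Notes on version B (the rewrite author's own statement) =====
-- stated objective: simpler
-- what changed: Replaces A's per-bit extract/shift/accumulate loop and final equality test by a single masked comparison (input & 0xAAAAAAAA) == 0x888A2228 against two precomputed constants.
import Mathlib
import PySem

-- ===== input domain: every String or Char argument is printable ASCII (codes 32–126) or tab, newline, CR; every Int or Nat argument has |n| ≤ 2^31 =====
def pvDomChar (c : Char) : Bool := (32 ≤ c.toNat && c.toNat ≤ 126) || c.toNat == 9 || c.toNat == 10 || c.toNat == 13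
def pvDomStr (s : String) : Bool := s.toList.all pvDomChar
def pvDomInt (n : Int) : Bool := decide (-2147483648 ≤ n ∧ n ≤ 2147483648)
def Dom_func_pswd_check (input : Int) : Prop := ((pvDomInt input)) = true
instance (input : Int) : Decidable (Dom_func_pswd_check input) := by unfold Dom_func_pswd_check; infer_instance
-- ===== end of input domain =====

-- B replaces A's per-bit extract-shift-accumulate loop by one masked comparison
-- against two precomputed constants (objective: simpler closed form; same exact behaviour).

-- ===== PORT A =====
def func_pswd_check (input : Int) : Bool :=
  let res := (PySem.List.pyRange 0 16 1).foldl
    (fun res i =>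
      let mask : Int := (1 : Int) <<< (2 * i + 1).toNat
      let tmp := PySem.Int.band input mask
      let tmp2 := tmp >>> (i + 1).toNat
      res + tmp2) 0
  if res = 0xAB56 then true else false

-- ===== PORT B =====
def func_pswd_check_alt (input : Int) : Bool :=
  PySem.Int.band input 0xAAAAAAAA == 0x888A2228

-- ===== PRECONDITION & SPEC =====
def Spec_func_pswd_check (input : Int) (out : Bool) : Prop := out = func_pswd_check_alt input
instance (input : Int) (out : Bool) : Decidable (Spec_func_pswd_check input out) := by unfold Spec_func_pswd_check; infer_instance

-- ===== CLAIM (what is proved, stated in full; the proofs are below) =====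
def Claim_equal_func_pswd_check : Prop := ∀ (input : Int), Dom_func_pswd_check input → Spec_func_pswd_check input (func_pswd_check input)

-- ===== LEMMAS AND PROOFS =====

-- Python bit j of x (two's complement, valid for all integers).
def pb (x : Int) (j : Nat) : Bool :=
  if 0 ≤ x then x.toNat.testBit j else !(-x - 1).toNat.testBit j

lemma natCast_shiftRight (m c : Nat) : ((m : Int) >>> c) = ((m >>> c : Nat) : Int) := by simp

lemma shift_pow (i : Nat) : (2^(2*i+1)) >>> (i+1) = 2^i := by
  rw [Nat.shiftRight_eq_div_pow, Nat.pow_div (by omega) (by norm_num),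
    show 2*i+1-(i+1) = i by omega]

lemma zero_shift (c : Nat) : ((0:Nat) >>> c) = 0 := by simp

lemma toNat_two_pow (j : Nat) : ((2:Int) ^ j).toNat = 2 ^ j := by
  rw [show ((2:Int) ^ j) = ((2 ^ j : Nat) : Int) by push_cast; ring]
  exact Int.toNat_natCast _

-- one loop iteration of A: extract bit 2*i+1 and move it to position i
lemma term_eq (x : Int) (i : Nat) :
    PySem.Int.band x ((2:Int) ^ (2*i+1)) >>> (i+1) = ((pb x (2*i+1)).toNat : Int) * 2 ^ i := by
  unfold PySem.Int.band pb
  have h2 : (0:Int) ≤ 2 ^ (2*i+1) := by positivity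
  by_cases hx : 0 ≤ x
  · simp only [hx, if_true, h2, if_true]
    rw [toNat_two_pow, Nat.and_two_pow, natCast_shiftRight]
    rcases Bool.eq_false_or_eq_true (x.toNat.testBit (2*i+1)) with hb | hb <;>
      rw [hb] <;> simp only [Bool.toNat_true, Bool.toNat_false, one_mul, zero_mul, zero_shift,
        shift_pow] <;> push_cast <;> ring
  · simp only [hx, if_false, h2, if_true]
    rw [toNat_two_pow, Nat.and_comm, Nat.and_two_pow, natCast_shiftRight]
    rcases Bool.eq_false_or_eq_true ((-x-1).toNat.testBit (2*i+1)) with hb | hb <;>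
      rw [hb] <;> simp only [Bool.toNat_true, Bool.toNat_false, Bool.not_true, Bool.not_false,
        one_mul, zero_mul, Nat.sub_self, Nat.sub_zero, zero_shift, shift_pow] <;>
      push_cast <;> ring

-- A's loop, written out: the sum of the 16 extracted bits placed at positions 0..15
lemma A_eq (x : Int) : func_pswd_check x =
    decide ((((pb x 1).toNat : Int) * 1 + ((pb x 3).toNat : Int) * 2 + ((pb x 5).toNat : Int) * 4 + ((pb x 7).toNat : Int) * 8 + ((pb x 9).toNat : Int) * 16 + ((pb x 11).toNat : Int) * 32 + ((pb x 13).toNat : Int) * 64 + ((pb x 15).toNat : Int) * 128 + ((pb x 17).toNat : Int) * 256 + ((pb x 19).toNat : Int) * 512 + ((pb x 21).toNat : Int) * 1024 + ((pb x 23).toNat : Int) * 2048 + ((pb x 25).toNat : Int) * 4096 + ((pb x 27).toNat : Int) * 8192 + ((pb x 29).toNat : Int) * 16384 + ((pb x 31).toNat : Int) * 32768) = 43862) := by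
  have t0 : PySem.Int.band x ((1:Int) <<< (1:Int)) >>> ((1:Int)) = ((pb x 1).toNat : Int) * 2 ^ 0 := by
    rw [show (1:Int) <<< (1:Int) = (2:Int)^(2*0+1) from by decide,
        show ((1:Int)) = (((0+1:Nat)):Int) from by norm_num, Int.shiftRight_natCast_right]
    exact term_eq x 0
  have t1 : PySem.Int.band x ((1:Int) <<< (3:Int)) >>> ((2:Int)) = ((pb x 3).toNat : Int) * 2 ^ 1 := by
    rw [show (1:Int) <<< (3:Int) = (2:Int)^(2*1+1) from by decide,
        show ((2:Int)) = (((1+1:Nat)):Int) from by norm_num, Int.shiftRight_natCast_right]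
    exact term_eq x 1
  have t2 : PySem.Int.band x ((1:Int) <<< (5:Int)) >>> ((3:Int)) = ((pb x 5).toNat : Int) * 2 ^ 2 := by
    rw [show (1:Int) <<< (5:Int) = (2:Int)^(2*2+1) from by decide,
        show ((3:Int)) = (((2+1:Nat)):Int) from by norm_num, Int.shiftRight_natCast_right]
    exact term_eq x 2
  have t3 : PySem.Int.band x ((1:Int) <<< (7:Int)) >>> ((4:Int)) = ((pb x 7).toNat : Int) * 2 ^ 3 := by
    rw [show (1:Int) <<< (7:Int) = (2:Int)^(2*3+1) from by decide,
        show ((4:Int)) = (((3+1:Nat)):Int) from by norm_num, Int.shiftRight_natCast_right]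
    exact term_eq x 3
  have t4 : PySem.Int.band x ((1:Int) <<< (9:Int)) >>> ((5:Int)) = ((pb x 9).toNat : Int) * 2 ^ 4 := by
    rw [show (1:Int) <<< (9:Int) = (2:Int)^(2*4+1) from by decide,
        show ((5:Int)) = (((4+1:Nat)):Int) from by norm_num, Int.shiftRight_natCast_right]
    exact term_eq x 4
  have t5 : PySem.Int.band x ((1:Int) <<< (11:Int)) >>> ((6:Int)) = ((pb x 11).toNat : Int) * 2 ^ 5 := by
    rw [show (1:Int) <<< (11:Int) = (2:Int)^(2*5+1) from by decide,
        show ((6:Int)) = (((5+1:Nat)):Int) from by norm_num, Int.shiftRight_natCast_right]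
    exact term_eq x 5
  have t6 : PySem.Int.band x ((1:Int) <<< (13:Int)) >>> ((7:Int)) = ((pb x 13).toNat : Int) * 2 ^ 6 := by
    rw [show (1:Int) <<< (13:Int) = (2:Int)^(2*6+1) from by decide,
        show ((7:Int)) = (((6+1:Nat)):Int) from by norm_num, Int.shiftRight_natCast_right]
    exact term_eq x 6
  have t7 : PySem.Int.band x ((1:Int) <<< (15:Int)) >>> ((8:Int)) = ((pb x 15).toNat : Int) * 2 ^ 7 := by
    rw [show (1:Int) <<< (15:Int) = (2:Int)^(2*7+1) from by decide,
        show ((8:Int)) = (((7+1:Nat)):Int) from by norm_num, Int.shiftRight_natCast_right]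
    exact term_eq x 7
  have t8 : PySem.Int.band x ((1:Int) <<< (17:Int)) >>> ((9:Int)) = ((pb x 17).toNat : Int) * 2 ^ 8 := by
    rw [show (1:Int) <<< (17:Int) = (2:Int)^(2*8+1) from by decide,
        show ((9:Int)) = (((8+1:Nat)):Int) from by norm_num, Int.shiftRight_natCast_right]
    exact term_eq x 8
  have t9 : PySem.Int.band x ((1:Int) <<< (19:Int)) >>> ((10:Int)) = ((pb x 19).toNat : Int) * 2 ^ 9 := by
    rw [show (1:Int) <<< (19:Int) = (2:Int)^(2*9+1) from by decide,
        show ((10:Int)) = (((9+1:Nat)):Int) from by norm_num, Int.shiftRight_natCast_right]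
    exact term_eq x 9
  have t10 : PySem.Int.band x ((1:Int) <<< (21:Int)) >>> ((11:Int)) = ((pb x 21).toNat : Int) * 2 ^ 10 := by
    rw [show (1:Int) <<< (21:Int) = (2:Int)^(2*10+1) from by decide,
        show ((11:Int)) = (((10+1:Nat)):Int) from by norm_num, Int.shiftRight_natCast_right]
    exact term_eq x 10
  have t11 : PySem.Int.band x ((1:Int) <<< (23:Int)) >>> ((12:Int)) = ((pb x 23).toNat : Int) * 2 ^ 11 := by
    rw [show (1:Int) <<< (23:Int) = (2:Int)^(2*11+1) from by decide,
        show ((12:Int)) = (((11+1:Nat)):Int) from by norm_num, Int.shiftRight_natCast_right]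
    exact term_eq x 11
  have t12 : PySem.Int.band x ((1:Int) <<< (25:Int)) >>> ((13:Int)) = ((pb x 25).toNat : Int) * 2 ^ 12 := by
    rw [show (1:Int) <<< (25:Int) = (2:Int)^(2*12+1) from by decide,
        show ((13:Int)) = (((12+1:Nat)):Int) from by norm_num, Int.shiftRight_natCast_right]
    exact term_eq x 12
  have t13 : PySem.Int.band x ((1:Int) <<< (27:Int)) >>> ((14:Int)) = ((pb x 27).toNat : Int) * 2 ^ 13 := by
    rw [show (1:Int) <<< (27:Int) = (2:Int)^(2*13+1) from by decide,
        show ((14:Int)) = (((13+1:Nat)):Int) from by norm_num, Int.shiftRight_natCast_right]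
    exact term_eq x 13
  have t14 : PySem.Int.band x ((1:Int) <<< (29:Int)) >>> ((15:Int)) = ((pb x 29).toNat : Int) * 2 ^ 14 := by
    rw [show (1:Int) <<< (29:Int) = (2:Int)^(2*14+1) from by decide,
        show ((15:Int)) = (((14+1:Nat)):Int) from by norm_num, Int.shiftRight_natCast_right]
    exact term_eq x 14
  have t15 : PySem.Int.band x ((1:Int) <<< (31:Int)) >>> ((16:Int)) = ((pb x 31).toNat : Int) * 2 ^ 15 := by
    rw [show (1:Int) <<< (31:Int) = (2:Int)^(2*15+1) from by decide,
        show ((16:Int)) = (((15+1:Nat)):Int) from by norm_num, Int.shiftRight_natCast_right]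
    exact term_eq x 15
  unfold func_pswd_check
  rw [show PySem.List.pyRange 0 16 1 = [0,1,2,3,4,5,6,7,8,9,10,11,12,13,14,15] from by decide]
  simp only [List.foldl]
  norm_num
  rw [t0, t1, t2, t3, t4, t5, t6, t7, t8, t9, t10, t11, t12, t13, t14, t15]
  norm_num

-- bits of the 32-bit odd-position mask 0xAAAAAAAA
lemma M_bit (j : Nat) : (2863311530:Nat).testBit j = (decide (j % 2 = 1) && decide (j < 32)) := by
  by_cases hj : j < 32
  · interval_cases j <;> decide
  · have hlt : (2863311530:Nat) < 2^j :=
      lt_of_lt_of_le (show (2863311530:Nat) < 2^32 by norm_num)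
        (Nat.pow_le_pow_right (by norm_num) (by omega))
    simp [Nat.testBit_lt_two_pow hlt, hj]

-- n &&& 0xAAAAAAAA = e (for e a submask of 0xAAAAAAAA) iff the odd bits of n match e
lemma band_mask_char (n e : Nat) (hsub : e &&& 2863311530 = e) :
    n &&& 2863311530 = e ↔ ∀ i, i < 16 → n.testBit (2*i+1) = e.testBit (2*i+1) := by
  constructor
  · intro h i hi
    have hm : (2863311530:Nat).testBit (2*i+1) = true := by
      rw [M_bit]; simp only [Bool.and_eq_true, decide_eq_true_eq]; omega
    have h2 := congrArg (fun t => Nat.testBit t (2*i+1)) h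
    simpa [Nat.testBit_and, hm] using h2
  · intro h
    have hesub : ∀ j, (e.testBit j && (2863311530:Nat).testBit j) = e.testBit j :=
      fun j => by simpa [Nat.testBit_and] using congrArg (fun t => Nat.testBit t j) hsub
    apply Nat.eq_of_testBit_eq
    intro j
    rw [Nat.testBit_and]
    by_cases hodd : j % 2 = 1 ∧ j < 32
    · have hm : (2863311530:Nat).testBit j = true := by
        rw [M_bit]; simp only [Bool.and_eq_true, decide_eq_true_eq]; omega
      obtain ⟨i, rfl⟩ : ∃ i, j = 2*i+1 := ⟨j/2, by omega⟩
      rw [hm, Bool.and_true]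
      exact h i (by omega)
    · have hm : (2863311530:Nat).testBit j = false := by
        rw [M_bit]
        rcases not_and_or.mp hodd with h1 | h1 <;> simp [h1]
      rw [hm, Bool.and_false]
      have h3 := hesub j
      rw [hm, Bool.and_false] at h3
      exact h3

-- uniqueness of the binary representation of 0xAB56, over the 16 bit variables
lemma sum_bits (b0 b1 b2 b3 b4 b5 b6 b7 b8 b9 b10 b11 b12 b13 b14 b15 : Bool) :
    ((b0).toNat * 1 + (b1).toNat * 2 + (b2).toNat * 4 + (b3).toNat * 8 + (b4).toNat * 16 + (b5).toNat * 32 + (b6).toNat * 64 + (b7).toNat * 128 + (b8).toNat * 256 + (b9).toNat * 512 + (b10).toNat * 1024 + (b11).toNat * 2048 + (b12).toNat * 4096 + (b13).toNat * 8192 + (b14).toNat * 16384 + (b15).toNat * 32768 = 43862) ↔ (b0 = false ∧ b1 = true ∧ b2 = true ∧ b3 = false ∧ b4 = true ∧ b5 = false ∧ b6 = true ∧ b7 = false ∧ b8 = true ∧ b9 = true ∧ b10 = false ∧ b11 = true ∧ b12 = false ∧ b13 = true ∧ b14 = false ∧ b15 = true) := by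
  have hb0 := Bool.toNat_le b0
  have hb1 := Bool.toNat_le b1
  have hb2 := Bool.toNat_le b2
  have hb3 := Bool.toNat_le b3
  have hb4 := Bool.toNat_le b4
  have hb5 := Bool.toNat_le b5
  have hb6 := Bool.toNat_le b6
  have hb7 := Bool.toNat_le b7
  have hb8 := Bool.toNat_le b8
  have hb9 := Bool.toNat_le b9
  have hb10 := Bool.toNat_le b10
  have hb11 := Bool.toNat_le b11
  have hb12 := Bool.toNat_le b12
  have hb13 := Bool.toNat_le b13
  have hb14 := Bool.toNat_le b14
  have hb15 := Bool.toNat_le b15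
  simp only [← Bool.toNat_eq_one, ← Bool.toNat_eq_zero]
  omega

-- A's bit-sum equals 0xAB56 iff the odd bits of n match 0x888A2228 (nonnegative case)
lemma pos_caseN (n : Nat) :
    ((n.testBit 1).toNat * 1 + (n.testBit 3).toNat * 2 + (n.testBit 5).toNat * 4 + (n.testBit 7).toNat * 8 + (n.testBit 9).toNat * 16 + (n.testBit 11).toNat * 32 + (n.testBit 13).toNat * 64 + (n.testBit 15).toNat * 128 + (n.testBit 17).toNat * 256 + (n.testBit 19).toNat * 512 + (n.testBit 21).toNat * 1024 + (n.testBit 23).toNat * 2048 + (n.testBit 25).toNat * 4096 + (n.testBit 27).toNat * 8192 + (n.testBit 29).toNat * 16384 + (n.testBit 31).toNat * 32768 = 43862) ↔ n &&& 2863311530 = 2290754088 := by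
  rw [sum_bits, band_mask_char n 2290754088 (by decide)]
  constructor
  · rintro ⟨c0, c1, c2, c3, c4, c5, c6, c7, c8, c9, c10, c11, c12, c13, c14, c15⟩ i hi
    interval_cases i <;> simp only [c0, c1, c2, c3, c4, c5, c6, c7, c8, c9, c10, c11, c12, c13, c14, c15] <;> decide
  · intro hf
    refine ⟨?_, ?_, ?_, ?_, ?_, ?_, ?_, ?_, ?_, ?_, ?_, ?_, ?_, ?_, ?_, ?_⟩
    · have h := hf 0 (by omega)
      rw [show (2290754088:Nat).testBit 1 = false from by decide] at h
      exact h
    · have h := hf 1 (by omega)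
      rw [show (2290754088:Nat).testBit 3 = true from by decide] at h
      exact h
    · have h := hf 2 (by omega)
      rw [show (2290754088:Nat).testBit 5 = true from by decide] at h
      exact h
    · have h := hf 3 (by omega)
      rw [show (2290754088:Nat).testBit 7 = false from by decide] at h
      exact h
    · have h := hf 4 (by omega)
      rw [show (2290754088:Nat).testBit 9 = true from by decide] at h
      exact h
    · have h := hf 5 (by omega)
      rw [show (2290754088:Nat).testBit 11 = false from by decide] at h
      exact h
    · have h := hf 6 (by omega)
      rw [show (2290754088:Nat).testBit 13 = true from by decide] at h
      exact h
    · have h := hf 7 (by omega)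
      rw [show (2290754088:Nat).testBit 15 = false from by decide] at h
      exact h
    · have h := hf 8 (by omega)
      rw [show (2290754088:Nat).testBit 17 = true from by decide] at h
      exact h
    · have h := hf 9 (by omega)
      rw [show (2290754088:Nat).testBit 19 = true from by decide] at h
      exact h
    · have h := hf 10 (by omega)
      rw [show (2290754088:Nat).testBit 21 = false from by decide] at h
      exact h
    · have h := hf 11 (by omega)
      rw [show (2290754088:Nat).testBit 23 = true from by decide] at h
      exact h
    · have h := hf 12 (by omega)
      rw [show (2290754088:Nat).testBit 25 = false from by decide] at h
      exact h
    · have h := hf 13 (by omega)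
      rw [show (2290754088:Nat).testBit 27 = true from by decide] at h
      exact h
    · have h := hf 14 (by omega)
      rw [show (2290754088:Nat).testBit 29 = false from by decide] at h
      exact h
    · have h := hf 15 (by omega)
      rw [show (2290754088:Nat).testBit 31 = true from by decide] at h
      exact h

lemma pos_case (n : Nat) :
    ((((n.testBit 1).toNat : Int)) * 1 + (((n.testBit 3).toNat : Int)) * 2 + (((n.testBit 5).toNat : Int)) * 4 + (((n.testBit 7).toNat : Int)) * 8 + (((n.testBit 9).toNat : Int)) * 16 + (((n.testBit 11).toNat : Int)) * 32 + (((n.testBit 13).toNat : Int)) * 64 + (((n.testBit 15).toNat : Int)) * 128 + (((n.testBit 17).toNat : Int)) * 256 + (((n.testBit 19).toNat : Int)) * 512 + (((n.testBit 21).toNat : Int)) * 1024 + (((n.testBit 23).toNat : Int)) * 2048 + (((n.testBit 25).toNat : Int)) * 4096 + (((n.testBit 27).toNat : Int)) * 8192 + (((n.testBit 29).toNat : Int)) * 16384 + (((n.testBit 31).toNat : Int)) * 32768 = 43862) ↔ ((n &&& 2863311530 : Nat) : Int) = 2290754088 := by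
  have hN := pos_caseN n
  constructor <;> intro h
  · exact_mod_cast hN.mp (by exact_mod_cast h)
  · exact_mod_cast hN.mpr (by exact_mod_cast h)

-- the negative case: bits of x are the complements of the bits of k = -x-1
lemma neg_caseN (k : Nat) :
    ((!k.testBit 1).toNat * 1 + (!k.testBit 3).toNat * 2 + (!k.testBit 5).toNat * 4 + (!k.testBit 7).toNat * 8 + (!k.testBit 9).toNat * 16 + (!k.testBit 11).toNat * 32 + (!k.testBit 13).toNat * 64 + (!k.testBit 15).toNat * 128 + (!k.testBit 17).toNat * 256 + (!k.testBit 19).toNat * 512 + (!k.testBit 21).toNat * 1024 + (!k.testBit 23).toNat * 2048 + (!k.testBit 25).toNat * 4096 + (!k.testBit 27).toNat * 8192 + (!k.testBit 29).toNat * 16384 + (!k.testBit 31).toNat * 32768 = 43862) ↔ 2863311530 - (2863311530 &&& k) = 2290754088 := by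
  have hle : (2863311530 &&& k) ≤ 2863311530 := Nat.and_le_left
  have h2 : (2863311530 - (2863311530 &&& k) = 2290754088) ↔ (k &&& 2863311530 = 572557442) := by
    rw [Nat.and_comm]; omega
  rw [sum_bits, h2, band_mask_char k 572557442 (by decide)]
  constructor
  · rintro ⟨c0, c1, c2, c3, c4, c5, c6, c7, c8, c9, c10, c11, c12, c13, c14, c15⟩ i hi
    have d0 : k.testBit 1 = true := by revert c0; cases k.testBit 1 <;> simp
    have d1 : k.testBit 3 = false := by revert c1; cases k.testBit 3 <;> simp
    have d2 : k.testBit 5 = false := by revert c2; cases k.testBit 5 <;> simp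
    have d3 : k.testBit 7 = true := by revert c3; cases k.testBit 7 <;> simp
    have d4 : k.testBit 9 = false := by revert c4; cases k.testBit 9 <;> simp
    have d5 : k.testBit 11 = true := by revert c5; cases k.testBit 11 <;> simp
    have d6 : k.testBit 13 = false := by revert c6; cases k.testBit 13 <;> simp
    have d7 : k.testBit 15 = true := by revert c7; cases k.testBit 15 <;> simp
    have d8 : k.testBit 17 = false := by revert c8; cases k.testBit 17 <;> simp
    have d9 : k.testBit 19 = false := by revert c9; cases k.testBit 19 <;> simp
    have d10 : k.testBit 21 = true := by revert c10; cases k.testBit 21 <;> simp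
    have d11 : k.testBit 23 = false := by revert c11; cases k.testBit 23 <;> simp
    have d12 : k.testBit 25 = true := by revert c12; cases k.testBit 25 <;> simp
    have d13 : k.testBit 27 = false := by revert c13; cases k.testBit 27 <;> simp
    have d14 : k.testBit 29 = true := by revert c14; cases k.testBit 29 <;> simp
    have d15 : k.testBit 31 = false := by revert c15; cases k.testBit 31 <;> simp
    interval_cases i <;> simp only [d0, d1, d2, d3, d4, d5, d6, d7, d8, d9, d10, d11, d12, d13, d14, d15] <;> decide
  · intro hf
    refine ⟨?_, ?_, ?_, ?_, ?_, ?_, ?_, ?_, ?_, ?_, ?_, ?_, ?_, ?_, ?_, ?_⟩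
    · have h := hf 0 (by omega)
      rw [show (572557442:Nat).testBit 1 = true from by decide] at h
      rw [h]
      decide
    · have h := hf 1 (by omega)
      rw [show (572557442:Nat).testBit 3 = false from by decide] at h
      rw [h]
      decide
    · have h := hf 2 (by omega)
      rw [show (572557442:Nat).testBit 5 = false from by decide] at h
      rw [h]
      decide
    · have h := hf 3 (by omega)
      rw [show (572557442:Nat).testBit 7 = true from by decide] at h
      rw [h]
      decide
    · have h := hf 4 (by omega)
      rw [show (572557442:Nat).testBit 9 = false from by decide] at h
      rw [h]
      decide
    · have h := hf 5 (by omega)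
      rw [show (572557442:Nat).testBit 11 = true from by decide] at h
      rw [h]
      decide
    · have h := hf 6 (by omega)
      rw [show (572557442:Nat).testBit 13 = false from by decide] at h
      rw [h]
      decide
    · have h := hf 7 (by omega)
      rw [show (572557442:Nat).testBit 15 = true from by decide] at h
      rw [h]
      decide
    · have h := hf 8 (by omega)
      rw [show (572557442:Nat).testBit 17 = false from by decide] at h
      rw [h]
      decide
    · have h := hf 9 (by omega)
      rw [show (572557442:Nat).testBit 19 = false from by decide] at h
      rw [h]
      decide
    · have h := hf 10 (by omega)
      rw [show (572557442:Nat).testBit 21 = true from by decide] at h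
      rw [h]
      decide
    · have h := hf 11 (by omega)
      rw [show (572557442:Nat).testBit 23 = false from by decide] at h
      rw [h]
      decide
    · have h := hf 12 (by omega)
      rw [show (572557442:Nat).testBit 25 = true from by decide] at h
      rw [h]
      decide
    · have h := hf 13 (by omega)
      rw [show (572557442:Nat).testBit 27 = false from by decide] at h
      rw [h]
      decide
    · have h := hf 14 (by omega)
      rw [show (572557442:Nat).testBit 29 = true from by decide] at h
      rw [h]
      decide
    · have h := hf 15 (by omega)
      rw [show (572557442:Nat).testBit 31 = false from by decide] at h
      rw [h]
      decide

lemma neg_case (k : Nat) :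
    ((((!k.testBit 1).toNat : Int)) * 1 + (((!k.testBit 3).toNat : Int)) * 2 + (((!k.testBit 5).toNat : Int)) * 4 + (((!k.testBit 7).toNat : Int)) * 8 + (((!k.testBit 9).toNat : Int)) * 16 + (((!k.testBit 11).toNat : Int)) * 32 + (((!k.testBit 13).toNat : Int)) * 64 + (((!k.testBit 15).toNat : Int)) * 128 + (((!k.testBit 17).toNat : Int)) * 256 + (((!k.testBit 19).toNat : Int)) * 512 + (((!k.testBit 21).toNat : Int)) * 1024 + (((!k.testBit 23).toNat : Int)) * 2048 + (((!k.testBit 25).toNat : Int)) * 4096 + (((!k.testBit 27).toNat : Int)) * 8192 + (((!k.testBit 29).toNat : Int)) * 16384 + (((!k.testBit 31).toNat : Int)) * 32768 = 43862) ↔ ((2863311530 - (2863311530 &&& k) : Nat) : Int) = 2290754088 := by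
  have hN := neg_caseN k
  constructor <;> intro h
  · exact_mod_cast hN.mp (by exact_mod_cast h)
  · exact_mod_cast hN.mpr (by exact_mod_cast h)

-- ===== VERDICT (by name: the statement is the Claim_ definition above) =====
theorem func_pswd_check_spec : Claim_equal_func_pswd_check := by
  unfold Claim_equal_func_pswd_check
  intro x _
  unfold Spec_func_pswd_check func_pswd_check_alt
  rw [A_eq, Bool.eq_iff_iff]
  simp only [decide_eq_true_eq, beq_iff_eq]
  by_cases hx : 0 ≤ x
  · have hb : PySem.Int.band x 2863311530 = ((x.toNat &&& 2863311530 : Nat) : Int) := by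
      unfold PySem.Int.band
      rw [if_pos hx, if_pos (by norm_num : (0:Int) ≤ 2863311530)]
      rw [show Int.toNat 2863311530 = 2863311530 from rfl]
    rw [hb]
    simp only [pb, hx, if_true]
    exact pos_case x.toNat
  · have hb : PySem.Int.band x 2863311530 =
        ((2863311530 - (2863311530 &&& (-x-1).toNat) : Nat) : Int) := by
      unfold PySem.Int.band
      rw [if_neg hx, if_pos (by norm_num : (0:Int) ≤ 2863311530)]
      rw [show Int.toNat 2863311530 = 2863311530 from rfl]
    rw [hb]
    simp only [pb, hx, if_false]
    exact neg_case (-x-1).toNat
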